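-- pv_equiv track=rewrite | github.com/KotisKotlyandii/lessons1 | ege22/172.py | f
-- ===== SOURCE A (Python) =====
-- def f(x):
--     a,b = 0,0
--     while x > 0:
--         if x % 2 == 0:
--             a += 1
--         else:
--
--             b += 1
--         x //= 2
--     return a,b
-- ===== SOURCE B (Python) =====
-- def f(x):
--     if x <= 0:
--         return (0, 0)
--     ones = bin(x).count('1')
--     total = x.bit_length()
--     return (total - ones, ones)
-- ===== Notes on version B (the rewrite author's own statement) =====
-- stated objective: idiomatic
-- what changed: Replaces the per-bit while loop with closed-form library calls: ones = bin(x).count('1') and total = x.bit_length(), returning (total - ones, ones).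
import Mathlib
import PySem

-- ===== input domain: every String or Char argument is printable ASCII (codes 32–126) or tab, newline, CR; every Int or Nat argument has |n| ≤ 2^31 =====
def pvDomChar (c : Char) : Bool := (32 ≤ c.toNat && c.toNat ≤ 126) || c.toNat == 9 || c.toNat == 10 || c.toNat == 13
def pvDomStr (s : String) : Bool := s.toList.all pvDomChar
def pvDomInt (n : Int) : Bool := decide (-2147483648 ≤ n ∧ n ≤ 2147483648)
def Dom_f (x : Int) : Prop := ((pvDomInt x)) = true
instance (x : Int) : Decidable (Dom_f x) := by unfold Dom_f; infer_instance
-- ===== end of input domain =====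

-- B replaces A's per-bit while loop with closed-form bit_length / popcount library calls.

-- ===== PORT A =====
-- A's while loop: state (a, b), condition x > 0; since x > 0 throughout we carry x as a Nat
-- (x // 2 = n / 2 and x % 2 = n % 2 agree with Python for non-negative x; Int.toNat sends x ≤ 0 to 0, matching the loop never running).
def fLoop : Nat → Int → Int → Int × Int
  | 0, a, b => (a, b)
  | n+1, a, b =>
    if (n+1) % 2 = 0 then fLoop ((n+1)/2) (a+1) b
    else fLoop ((n+1)/2) a (b+1)

def f (x : Int) : Int × Int := fLoop x.toNat 0 0

-- ===== PORT B =====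
-- port of Python's int.bit_length
def pvBitLen : Nat → Nat
  | 0 => 0
  | n+1 => pvBitLen ((n+1)/2) + 1

-- port of bin(x).count('1') (popcount)
def pvPopCnt : Nat → Nat
  | 0 => 0
  | n+1 => pvPopCnt ((n+1)/2) + (n+1) % 2

def f_alt (x : Int) : Int × Int :=
  if x ≤ 0 then (0, 0)
  else ((pvBitLen x.toNat : Int) - (pvPopCnt x.toNat : Int), (pvPopCnt x.toNat : Int))

-- ===== PRECONDITION & SPEC =====
def Spec_f (x : Int) (out : Int × Int) : Prop := out = f_alt x
instance (x : Int) (out : Int × Int) : Decidable (Spec_f x out) := by unfold Spec_f; infer_instance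

-- ===== CLAIM (what is proved, stated in full; the proofs are below) =====
def Claim_equal_f : Prop := ∀ (x : Int), Dom_f x → Spec_f x (f x)

-- ===== LEMMAS AND PROOFS =====
theorem fLoop_eq (n : Nat) : ∀ (a b : Int),
    fLoop n a b = (a + ((pvBitLen n : Int) - (pvPopCnt n : Int)), b + (pvPopCnt n : Int)) := by
  induction n using Nat.strong_induction_on with
  | _ n ih =>
    intro a b
    match n with
    | 0 => simp [fLoop, pvBitLen, pvPopCnt]
    | m+1 =>
      have hlt : (m+1)/2 < m+1 := Nat.div_lt_self (Nat.succ_pos m) (by norm_num)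
      by_cases h : (m+1) % 2 = 0
      · rw [fLoop, if_pos h, ih _ hlt]
        rw [pvBitLen, pvPopCnt, h]
        push_cast
        ring_nf
      · rw [fLoop, if_neg h, ih _ hlt]
        have h1 : (m+1) % 2 = 1 := Nat.mod_two_eq_zero_or_one (m+1) |>.resolve_left h
        rw [pvBitLen, pvPopCnt, h1]
        push_cast
        ring_nf

-- ===== VERDICT (by name: the statement is the Claim_ definition above) =====
theorem f_spec : Claim_equal_f := by
  intro x _
  unfold Spec_f f f_alt
  rw [fLoop_eq]
  by_cases h : x ≤ 0
  · have : x.toNat = 0 := Int.toNat_of_nonpos h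
    simp [this, pvBitLen, pvPopCnt, h]
  · simp [h]
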